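-- pv_equiv track=rewrite | github.com/elciclon/algoritmos-y-estructuras-de-datos | guia_7/pos_secuencia_ordenada_mas_larga.py | pos_secuencia_ordenada_mas_larga
-- ===== SOURCE A (Python) =====
-- def pos_secuencia_ordenada_mas_larga(s: list[int]) -> int:
--     indice: int = 0
--     longitud: int = 0
--     longitud_maxima: int = 0
--     for i in range(0, len(s) - 1):
--         if s[i] < s[i + 1]:
--             longitud += 1
--             if longitud > longitud_maxima:
--                 longitud_maxima = longitud
--                 indice = i + 1 - longitud
--         else:
--             longitud = 0
--     return indice
-- ===== SOURCE B (Python) =====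
-- def pos_secuencia_ordenada_mas_larga(s: list[int]) -> int:
--     # Run-jumping scan: measure each maximal increasing run from its start,
--     # keep the start of the first strictly longest one.
--     n = len(s)
--     indice = 0
--     best = 0
--     i = 0
--     while i < n - 1:
--         j = i
--         while j < n - 1 and s[j] < s[j + 1]:
--             j += 1
--         g = j - i
--         if g > best:
--             best = g
--             indice = i
--         i = j + 1
--     return indice
-- ===== Notes on version B (the rewrite author's own statement) =====
-- stated objective: alternative
-- what changed: Replaces the per-element incremental counter with reset by a run-jumping two-pointer scan that measures each maximal increasing run from its start and jumps past it, keeping the start of the first strictly longest run.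
import Mathlib
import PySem

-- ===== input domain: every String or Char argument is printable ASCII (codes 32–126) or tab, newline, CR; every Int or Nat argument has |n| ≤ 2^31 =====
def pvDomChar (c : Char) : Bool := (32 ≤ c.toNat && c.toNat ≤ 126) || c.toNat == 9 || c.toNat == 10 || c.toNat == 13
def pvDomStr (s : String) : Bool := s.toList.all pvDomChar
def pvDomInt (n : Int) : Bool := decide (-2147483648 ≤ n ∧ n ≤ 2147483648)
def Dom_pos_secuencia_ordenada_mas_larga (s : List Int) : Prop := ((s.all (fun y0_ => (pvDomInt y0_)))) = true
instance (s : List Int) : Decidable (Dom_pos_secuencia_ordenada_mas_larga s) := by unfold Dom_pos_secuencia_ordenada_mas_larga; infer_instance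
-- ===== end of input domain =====

-- B is an alternative O(n) decomposition (run-jumping two-pointer scan instead of an
-- incremental counter with reset); equivalence of the return value is proved for all inputs.
-- Loops are transliterated with a structural fuel of len(s), always sufficient.

-- ===== PORT A =====
-- for i in range(0, len(s)-1): incremental counter `lon`, best `mx`, answer `ind`.
def pvALoop (s : List Int) : Nat → Nat → Int → Nat → Nat → Int
  | 0, _, ind, _, _ => ind
  | fuel + 1, i, ind, lon, mx =>
    if i < s.length - 1 then
      if s.getD i 0 < s.getD (i + 1) 0 then
        if lon + 1 > mx then
          pvALoop s fuel (i + 1) ((i : Int) + 1 - ((lon : Int) + 1)) (lon + 1) (lon + 1)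
        else
          pvALoop s fuel (i + 1) ind (lon + 1) mx
      else
        pvALoop s fuel (i + 1) ind 0 mx
    else ind

def pos_secuencia_ordenada_mas_larga (s : List Int) : Int :=
  pvALoop s s.length 0 0 0 0

-- ===== PORT B =====
-- inner while loop: advance j while j < n-1 and s[j] < s[j+1]
def pvInner (s : List Int) : Nat → Nat → Nat
  | 0, j => j
  | fuel + 1, j =>
    if j < s.length - 1 ∧ s.getD j 0 < s.getD (j + 1) 0 then pvInner s fuel (j + 1) else j

-- outer while loop: measure each maximal increasing run, jump past it
def pvOuter (s : List Int) : Nat → Nat → Int → Nat → Int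
  | 0, _, ind, _ => ind
  | fuel + 1, i, ind, best =>
    if i < s.length - 1 then
      if pvInner s s.length i - i > best then
        pvOuter s fuel (pvInner s s.length i + 1) (i : Int) (pvInner s s.length i - i)
      else
        pvOuter s fuel (pvInner s s.length i + 1) ind best
    else ind

def pos_secuencia_ordenada_mas_larga_alt (s : List Int) : Int :=
  pvOuter s s.length 0 0 0

-- ===== PRECONDITION & SPEC =====
def Spec_pos_secuencia_ordenada_mas_larga (s : List Int) (out : Int) : Prop := out = pos_secuencia_ordenada_mas_larga_alt s
instance (s : List Int) (out : Int) : Decidable (Spec_pos_secuencia_ordenada_mas_larga s out) := by unfold Spec_pos_secuencia_ordenada_mas_larga; infer_instance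

-- ===== CLAIM (what is proved, stated in full; the proofs are below) =====
def Claim_equal_pos_secuencia_ordenada_mas_larga : Prop := ∀ (s : List Int), Dom_pos_secuencia_ordenada_mas_larga s → Spec_pos_secuencia_ordenada_mas_larga s (pos_secuencia_ordenada_mas_larga s)

-- ===== LEMMAS AND PROOFS =====

theorem pvALoop_congr (s : List Int) (k x : Nat) {a b : Int} {m m' : Nat}
    (ha : a = b) (hm : m = m') : pvALoop s k x a 0 m = pvALoop s k x b 0 m' := by
  rw [ha, hm]

theorem pvALoop_stop (s : List Int) (k i : Nat) (ind : Int) (lon mx : Nat)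
    (h : ¬ i < s.length - 1) : pvALoop s k i ind lon mx = ind := by
  cases k with
  | zero => rfl
  | succ k => simp [pvALoop, h]

theorem pvALoop_fuel (s : List Int) : ∀ (k k' i : Nat) (ind : Int) (lon mx : Nat),
    s.length - 1 - i ≤ k → s.length - 1 - i ≤ k' →
    pvALoop s k i ind lon mx = pvALoop s k' i ind lon mx := by
  intro k
  induction k with
  | zero =>
    intro k' i ind lon mx hk hk'
    rw [pvALoop_stop s 0 i ind lon mx (by omega), pvALoop_stop s k' i ind lon mx (by omega)]
  | succ k ih =>
    intro k' i ind lon mx hk hk'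
    by_cases hni : i < s.length - 1
    · cases k' with
      | zero => omega
      | succ k' =>
        simp only [pvALoop, if_pos hni]
        split_ifs <;> exact ih k' (i + 1) _ _ _ (by omega) (by omega)
    · rw [pvALoop_stop s _ i ind lon mx hni, pvALoop_stop s _ i ind lon mx hni]

theorem pvInner_stop (s : List Int) (k j : Nat)
    (h : ¬ (j < s.length - 1 ∧ s.getD j 0 < s.getD (j + 1) 0)) : pvInner s k j = j := by
  cases k with
  | zero => rfl
  | succ k => simp only [pvInner]; rw [if_neg h]

theorem pvInner_step (s : List Int) (k j : Nat)
    (h : j < s.length - 1 ∧ s.getD j 0 < s.getD (j + 1) 0) :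
    pvInner s (k + 1) j = pvInner s k (j + 1) := by
  simp only [pvInner]; rw [if_pos h]

theorem pvInner_ge (s : List Int) : ∀ (k j : Nat), j ≤ pvInner s k j := by
  intro k
  induction k with
  | zero => intro j; exact le_refl j
  | succ k ih =>
    intro j
    by_cases h : j < s.length - 1 ∧ s.getD j 0 < s.getD (j + 1) 0
    · rw [pvInner_step s k j h]; have := ih (j + 1); omega
    · rw [pvInner_stop s (k + 1) j h]

theorem pvInner_fuel (s : List Int) : ∀ (k k' j : Nat),
    s.length - 1 - j ≤ k → s.length - 1 - j ≤ k' →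
    pvInner s k j = pvInner s k' j := by
  intro k
  induction k with
  | zero =>
    intro k' j hk hk'
    have h : ¬ (j < s.length - 1 ∧ s.getD j 0 < s.getD (j + 1) 0) := fun hx => by omega
    rw [pvInner_stop s 0 j h, pvInner_stop s k' j h]
  | succ k ih =>
    intro k' j hk hk'
    by_cases h : j < s.length - 1 ∧ s.getD j 0 < s.getD (j + 1) 0
    · cases k' with
      | zero => omega
      | succ k' =>
        rw [pvInner_step s k j h, pvInner_step s k' j h]
        exact ih k' (j + 1) (by omega) (by omega)
    · rw [pvInner_stop s _ j h, pvInner_stop s _ j h]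

-- RUN invariant: processing from i with current-run counter lon (lon ≤ mx) first
-- consumes the whole increasing run ending at pvInner s s.length i, updating (ind, mx) once.
theorem pvRun (s : List Int) : ∀ (k i : Nat) (ind : Int) (lon mx : Nat),
    s.length - 1 - i ≤ k → lon ≤ mx →
    pvALoop s k i ind lon mx =
      (if pvInner s s.length i < s.length - 1 then
        pvALoop s s.length (pvInner s s.length i + 1)
          (if lon + (pvInner s s.length i - i) > mx then (i : Int) - lon else ind) 0
          (max mx (lon + (pvInner s s.length i - i)))
      else
        (if lon + (pvInner s s.length i - i) > mx then (i : Int) - lon else ind)) := by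
  intro k
  induction k with
  | zero =>
    intro i ind lon mx hk hlm
    have hni : ¬ i < s.length - 1 := by omega
    have hstop : pvInner s s.length i = i := pvInner_stop s s.length i (fun hx => hni hx.1)
    rw [pvALoop_stop s 0 i ind lon mx hni, hstop]
    simp only [Nat.sub_self, Nat.add_zero]
    rw [if_neg hni, if_neg (by omega : ¬ lon > mx)]
  | succ k ih =>
    intro i ind lon mx hk hlm
    by_cases hni : i < s.length - 1
    · by_cases hcmp : s.getD i 0 < s.getD (i + 1) 0
      · -- comparison holds: one more element of the current run
        have hn1 : 1 ≤ s.length := by omega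
        have hstep : pvInner s s.length i = pvInner s s.length (i + 1) := by
          obtain ⟨m, hm⟩ : ∃ m, s.length = m + 1 := ⟨s.length - 1, by omega⟩
          rw [hm, pvInner_step s m i ⟨hni, hcmp⟩]
          exact pvInner_fuel s m (m + 1) (i + 1) (by omega) (by omega)
        have hge : i + 1 ≤ pvInner s s.length (i + 1) := pvInner_ge s s.length (i + 1)
        simp only [pvALoop, if_pos hni, if_pos hcmp]
        rw [hstep]
        by_cases hc1 : lon + 1 > mx
        · rw [if_pos hc1,
            ih (i + 1) ((i : Int) + 1 - ((lon : Int) + 1)) (lon + 1) (lon + 1)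
              (by omega) (le_refl _)]
          by_cases hr : pvInner s s.length (i + 1) < s.length - 1
          · rw [if_pos hr, if_pos hr]
            apply pvALoop_congr
            · split_ifs <;> push_cast <;> omega
            · omega
          · rw [if_neg hr, if_neg hr]
            split_ifs <;> push_cast <;> omega
        · rw [if_neg hc1,
            ih (i + 1) ind (lon + 1) mx (by omega) (by omega)]
          by_cases hr : pvInner s s.length (i + 1) < s.length - 1
          · rw [if_pos hr, if_pos hr]
            apply pvALoop_congr
            · split_ifs <;> push_cast <;> omega
            · omega
          · rw [if_neg hr, if_neg hr]
            split_ifs <;> push_cast <;> omega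
      · -- comparison fails: the run is empty, counter resets
        have hstop : pvInner s s.length i = i := pvInner_stop s s.length i (fun hx => hcmp hx.2)
        simp only [pvALoop, if_pos hni, if_neg hcmp]
        rw [hstop]
        simp only [Nat.sub_self, Nat.add_zero]
        rw [if_pos hni, if_neg (by omega : ¬ lon > mx)]
        rw [pvALoop_fuel s k s.length (i + 1) ind 0 mx (by omega) (by omega)]
        exact pvALoop_congr s s.length (i + 1) rfl (by omega)
    · have hstop : pvInner s s.length i = i := pvInner_stop s s.length i (fun hx => hni hx.1)
      rw [pvALoop_stop s (k + 1) i ind lon mx hni, hstop]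
      simp only [Nat.sub_self, Nat.add_zero]
      rw [if_neg hni, if_neg (by omega : ¬ lon > mx)]

theorem pvOuter_stop (s : List Int) (k i : Nat) (ind : Int) (best : Nat)
    (h : ¬ i < s.length - 1) : pvOuter s k i ind best = ind := by
  cases k with
  | zero => rfl
  | succ k => simp [pvOuter, h]

-- KEY: at a run boundary (counter 0) A's loop agrees with B's run-jumping loop.
theorem pvKey (s : List Int) : ∀ (k' k i : Nat) (ind : Int) (mx : Nat),
    s.length - 1 - i ≤ k → s.length - 1 - i ≤ k' →
    pvALoop s k i ind 0 mx = pvOuter s k' i ind mx := by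
  intro k'
  induction k' with
  | zero =>
    intro k i ind mx hk hk'
    have hni : ¬ i < s.length - 1 := by omega
    rw [pvALoop_stop s k i ind 0 mx hni, pvOuter_stop s 0 i ind mx hni]
  | succ k' ih =>
    intro k i ind mx hk hk'
    by_cases hni : i < s.length - 1
    · have hge : i ≤ pvInner s s.length i := pvInner_ge s s.length i
      rw [pvRun s k i ind 0 mx hk (Nat.zero_le mx)]
      simp only [pvOuter, if_pos hni]
      simp only [Nat.zero_add, Nat.cast_zero, sub_zero]
      by_cases hr : pvInner s s.length i < s.length - 1
      · rw [if_pos hr]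
        by_cases hgt : pvInner s s.length i - i > mx
        · rw [if_pos hgt, if_pos hgt]
          rw [(by omega : max mx (pvInner s s.length i - i) = pvInner s s.length i - i)]
          exact ih s.length (pvInner s s.length i + 1) (i : Int) (pvInner s s.length i - i)
            (by omega) (by omega)
        · rw [if_neg hgt, if_neg hgt]
          rw [(by omega : max mx (pvInner s s.length i - i) = mx)]
          exact ih s.length (pvInner s s.length i + 1) ind mx (by omega) (by omega)
      · rw [if_neg hr]
        by_cases hgt : pvInner s s.length i - i > mx
        · rw [if_pos hgt, if_pos hgt,
            pvOuter_stop s k' (pvInner s s.length i + 1) (i : Int) _ (by omega)]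
        · rw [if_neg hgt, if_neg hgt,
            pvOuter_stop s k' (pvInner s s.length i + 1) ind mx (by omega)]
    · rw [pvALoop_stop s k i ind 0 mx hni, pvOuter_stop s (k' + 1) i ind mx hni]

-- ===== VERDICT (by name: the statement is the Claim_ definition above) =====
theorem pos_secuencia_ordenada_mas_larga_spec : Claim_equal_pos_secuencia_ordenada_mas_larga := by
  intro s _
  unfold Spec_pos_secuencia_ordenada_mas_larga pos_secuencia_ordenada_mas_larga
    pos_secuencia_ordenada_mas_larga_alt
  exact pvKey s s.length s.length 0 0 0 (by omega) (by omega)
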